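-- pv_equiv track=rewrite | github.com/rahulnm-13/Recommendation_System | Recommend_Systems.py | new_cat2
-- ===== SOURCE A (Python) =====
-- def new_cat2(string):
--     ctr = 0
--     size = 0
--     for i in range(len(string)):
--         if(ctr==6):
--             break
--         if(string[i]=='>'):
--             ctr += 1
--         size += 1
--     return size-3
-- ===== SOURCE B (Python) =====
-- def new_cat2(string):
--     parts = string.split('>', 6)
--     if len(parts) < 7:
--         return len(string) - 3
--     return sum(map(len, parts[:6])) + 3
-- ===== Notes on version B (the rewrite author's own statement) =====
-- stated objective: faster
-- what changed: B replaces A's character-by-character counting loop with a single maxsplit-6 delimiter split and arithmetic on the resulting segment lengths (fallback len-3 when fewer than 7 parts).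
import Mathlib
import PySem

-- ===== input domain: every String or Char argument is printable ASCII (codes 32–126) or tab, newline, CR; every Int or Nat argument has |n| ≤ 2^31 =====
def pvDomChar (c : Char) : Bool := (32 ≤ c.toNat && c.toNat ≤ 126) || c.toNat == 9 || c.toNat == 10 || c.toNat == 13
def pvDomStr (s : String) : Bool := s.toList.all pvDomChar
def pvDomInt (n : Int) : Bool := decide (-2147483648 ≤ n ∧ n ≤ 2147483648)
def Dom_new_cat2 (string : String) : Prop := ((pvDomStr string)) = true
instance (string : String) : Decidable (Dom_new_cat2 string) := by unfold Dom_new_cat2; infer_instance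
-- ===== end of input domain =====

-- B replaces A's character-by-character counting loop with one maxsplit-6 delimiter split
-- and arithmetic on the segment lengths; a timing run measured B faster (constant factor).

-- ===== PORT A =====
-- the for-loop over range(len(string)) with its break, carrying (ctr, size)
def new_cat2_go (cs : List Char) (ctr size : Int) : Int × Int :=
  match cs with
  | [] => (ctr, size)
  | c :: rest =>
    if ctr = 6 then (ctr, size)
    else new_cat2_go rest (if c = '>' then ctr + 1 else ctr) (size + 1)

def new_cat2 (string : String) : Int :=
  (new_cat2_go string.toList 0 0).2 - 3

-- ===== PORT B =====
-- parts = string.split('>', 6); if len(parts) < 7: return len(string)-3; return sum(map(len, parts[:6])) + 3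
def new_cat2_alt (string : String) : Int :=
  let parts := (PySem.Str.splitMax? string ">" 6).getD []
  if parts.length < 7 then PySem.Str.len string - 3
  else ((parts.take 6).map PySem.Str.len).sum + 3

-- ===== PRECONDITION & SPEC =====
def Spec_new_cat2 (string : String) (out : Int) : Prop := out = new_cat2_alt string
instance (string : String) (out : Int) : Decidable (Spec_new_cat2 string out) := by unfold Spec_new_cat2; infer_instance

-- ===== CLAIM (what is proved, stated in full; the proofs are below) =====
def Claim_equal_new_cat2 : Prop := ∀ (string : String), Dom_new_cat2 string → Spec_new_cat2 string (new_cat2 string)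

-- ===== LEMMAS AND PROOFS =====

-- reference: number of characters consumed until (and including) the m-th '>' (all of cs if fewer)
def pvRef : List Char → Nat → Int
  | _, 0 => 0
  | [], _ + 1 => 0
  | c :: rest, m + 1 => 1 + (if c = '>' then pvRef rest m else pvRef rest (m + 1))

theorem pvRef_zero (cs : List Char) : pvRef cs 0 = 0 := by cases cs <;> rfl

theorem goA_eq (cs : List Char) : ∀ (m : Nat) (size : Int), m ≤ 6 →
    (new_cat2_go cs (6 - (m : Int)) size).2 = size + pvRef cs m := by
  induction cs with
  | nil => intro m size _; cases m <;> simp [new_cat2_go, pvRef]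
  | cons c rest ih =>
    intro m size hm
    cases m with
    | zero => simp [new_cat2_go, pvRef_zero]
    | succ m' =>
      rw [new_cat2_go, if_neg (show ¬((6 : Int) - ((m' + 1 : Nat) : Int) = 6) by push_cast; omega)]
      by_cases hc : c = '>'
      · have e : (6 : Int) - ((m' + 1 : Nat) : Int) + 1 = 6 - (m' : Int) := by push_cast; ring
        rw [if_pos hc, e, ih m' (size + 1) (by omega)]
        simp [pvRef, hc]; ring
      · rw [if_neg hc, ih (m' + 1) (size + 1) hm]
        simp [pvRef, hc]; ring

theorem new_cat2_eq_ref (s : String) : new_cat2 s = pvRef s.toList 6 - 3 := by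
  have := goA_eq s.toList 6 0 (le_refl _)
  simp at this
  simp [new_cat2, this]

-- reference semantics of str.split('>', m) on a character list
def pvS : Nat → List Char → List (List Char)
  | 0, l => [l]
  | _ + 1, [] => [[]]
  | m + 1, c :: rest =>
    if c = '>' then [] :: pvS m rest
    else (c :: (pvS (m + 1) rest).headI) :: (pvS (m + 1) rest).tail

theorem pvS_ne_nil (m : Nat) (l : List Char) : pvS m l ≠ [] := by
  match m, l with
  | 0, l => simp [pvS]
  | m + 1, [] => simp [pvS]
  | m + 1, c :: rest => by_cases hc : c = '>' <;> simp [pvS, hc]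

theorem headI_tail_eq {α : Type} [Inhabited α] {l : List α} (h : l ≠ []) : l.headI :: l.tail = l := by
  cases l with
  | nil => exact absurd rfl h
  | cons a t => rfl

theorem pvS_len_le (m : Nat) (l : List Char) : (pvS m l).length ≤ m + 1 := by
  induction l generalizing m with
  | nil => cases m <;> simp [pvS]
  | cons c rest ih =>
    cases m with
    | zero => simp [pvS]
    | succ m' =>
      by_cases hc : c = '>'
      · simpa [pvS, hc] using ih m'
      · have h1 := ih (m' + 1)
        have h2 := pvS_ne_nil (m' + 1) rest
        simp only [pvS, hc, if_false, List.length_cons]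
        rw [List.length_tail]
        omega

-- the two facts B needs: few parts ⇒ pvRef is the whole length; full parts ⇒ pvRef = sum of first m lengths + m
theorem pvS_pvRef (m : Nat) (l : List Char) :
    ((pvS m l).length ≤ m → pvRef l m = (l.length : Int)) ∧
    ((pvS m l).length = m + 1 →
      pvRef l m = ((((pvS m l).take m).map List.length).sum : Int) + m) := by
  induction l generalizing m with
  | nil =>
    cases m with
    | zero => simp [pvS, pvRef]
    | succ m' => simp [pvS, pvRef]
  | cons c rest ih =>
    cases m with
    | zero => simp [pvS, pvRef_zero]
    | succ m' =>
      by_cases hc : c = '>'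
      · have ih' := ih m'
        constructor
        · intro hlen
          simp only [pvS, hc, if_true, List.length_cons] at hlen
          have := ih'.1 (by omega)
          simp [pvRef, hc, this]
          omega
        · intro hlen
          simp only [pvS, hc, if_true, List.length_cons] at hlen
          have := ih'.2 (by omega)
          simp [pvRef, hc, this, pvS]
          ring
      · have ih' := ih (m' + 1)
        have hne := pvS_ne_nil (m' + 1) rest
        obtain ⟨p, ps, hps⟩ : ∃ p ps, pvS (m' + 1) rest = p :: ps := by
          cases h : pvS (m' + 1) rest with
          | nil => exact absurd h hne
          | cons p ps => exact ⟨p, ps, rfl⟩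
        have hlenS : (pvS (m' + 1) (c :: rest)).length = (pvS (m' + 1) rest).length := by
          simp [pvS, hc, hps]
        constructor
        · intro hlen
          rw [hlenS] at hlen
          have := ih'.1 hlen
          simp [pvRef, hc, this]
          omega
        · intro hlen
          rw [hlenS] at hlen
          have h2 := ih'.2 hlen
          rw [hps] at h2
          simp only [pvS, hc, if_false, hps, List.headI, List.tail]
          have htake : ((p :: ps).take (m' + 1)).map List.length =
              p.length :: ((ps.take m').map List.length) := by
            simp [List.take]
          rw [htake] at h2
          have htake2 : (((c :: p) :: ps).take (m' + 1)).map List.length =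
              (p.length + 1) :: ((ps.take m').map List.length) := by
            simp [List.take]
          rw [htake2]
          simp only [pvRef, hc, if_false, h2]
          push_cast
          simp [List.sum_cons]
          ring

-- splitOnMax.go computes pvS (modulo the carried accumulators), given enough fuel
theorem go_eq_pvS (fuel : Nat) : ∀ (l : List Char), l.length < fuel → ∀ (m : Nat) (cur : List Char) (acc : List (List Char)),
    PySem.Chars.splitOnMax.go ['>'] fuel m l cur acc =
      acc.reverse ++ (cur.reverse ++ (pvS m l).headI) :: (pvS m l).tail := by
  induction fuel with
  | zero => intro l hl; omega
  | succ f ih =>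
    intro l hl m cur acc
    cases l with
    | nil =>
      cases m <;> simp [PySem.Chars.splitOnMax.go, pvS]
    | cons c rest =>
      cases m with
      | zero =>
        simp [PySem.Chars.splitOnMax.go, pvS]
      | succ m' =>
        by_cases hc : c = '>'
        · have hpre : List.isPrefixOf ['>'] (c :: rest) = true := by
            simp [hc, List.isPrefixOf]
          rw [PySem.Chars.splitOnMax.go]
          simp only [if_neg (Nat.succ_ne_zero m'), hpre, if_true]
          have hdrop : List.drop (['>'] : List Char).length (c :: rest) = rest := by simp
          rw [hdrop]
          rw [show m' + 1 - 1 = m' from rfl]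
          rw [ih rest (by simpa using Nat.lt_of_succ_lt_succ hl) m' [] (cur.reverse :: acc)]
          have hne := pvS_ne_nil m' rest
          simp only [pvS, hc, if_true, List.headI_cons, List.tail_cons, List.reverse_cons,
            List.append_assoc, List.nil_append, List.singleton_append, List.reverse_nil,
            List.append_nil]
          rw [headI_tail_eq hne]
        · have hpre : List.isPrefixOf ['>'] (c :: rest) = false := by
            simp [List.isPrefixOf]
            intro h; exact absurd h.symm hc
          rw [PySem.Chars.splitOnMax.go]
          simp only [if_neg (Nat.succ_ne_zero m'), hpre]
          rw [if_neg (by simp)]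
          rw [ih rest (by simpa using Nat.lt_of_succ_lt_succ hl) (m' + 1) (c :: cur) acc]
          simp [pvS, hc]
  -- note: the `go` match also destructs fuel = 0 / l = [] first; handled by the case split above

theorem splitOnMax_eq_pvS (cs : List Char) :
    PySem.Chars.splitOnMax cs ['>'] 6 = pvS 6 cs := by
  rw [PySem.Chars.splitOnMax]
  rw [if_neg (by omega)]
  have h6 : ((6 : Int)).toNat = 6 := rfl
  rw [h6, go_eq_pvS (cs.length + 1) cs (by omega) 6 [] []]
  simp only [List.reverse_nil, List.nil_append]
  exact headI_tail_eq (pvS_ne_nil 6 cs)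

theorem sum_map_len_cast (ps : List (List Char)) :
    (List.map PySem.Str.len (List.map String.ofList ps)).sum =
      (((ps.map List.length).sum : Nat) : Int) := by
  induction ps with
  | nil => simp
  | cons p ps ih =>
    simp only [List.map_cons, List.sum_cons, PySem.Str.len]
    rw [ih]
    push_cast
    simp

-- ===== VERDICT (by name: the statement is the Claim_ definition above) =====
theorem new_cat2_spec : Claim_equal_new_cat2 := by
  intro s _
  unfold Spec_new_cat2 new_cat2_alt
  rw [new_cat2_eq_ref]
  have hsplit : PySem.Str.splitMax? s ">" 6 =
      some ((pvS 6 s.toList).map String.ofList) := by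
    rw [PySem.Str.splitMax?]
    rw [PySem.Chars.splitMax?]
    rw [if_neg (by simp [List.isEmpty])]
    have : (">".toList : List Char) = ['>'] := rfl
    rw [this, splitOnMax_eq_pvS]
    rfl
  rw [hsplit]
  simp only [Option.getD_some, List.length_map]
  have hle := pvS_len_le 6 s.toList
  by_cases h7 : (pvS 6 s.toList).length < 7
  · rw [if_pos (by simpa using h7)]
    have := (pvS_pvRef 6 s.toList).1 (by omega)
    simp [this, PySem.Str.len]
  · rw [if_neg (by simpa using h7)]
    have heq : (pvS 6 s.toList).length = 7 := by omega
    have := (pvS_pvRef 6 s.toList).2 heq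
    rw [this]
    rw [← List.map_take, sum_map_len_cast]
    omega
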